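-- pv_equiv track=rewrite | github.com/mdsagir/ds | recursion/fact.py | step_to_zero_rec
-- ===== SOURCE A (Python) =====
-- def step_to_zero_rec(num, count=0):
--     if num == 0:
--         return count
--     if num % 2 == 0:
--         num = num // 2
--         count = count + 1
--     else:
--         num = num - 1
--         count = count + 1
--     return step_to_zero_rec(num, count)
-- ===== SOURCE B (Python) =====
-- def step_to_zero_rec(num, count=0):
--     # closed form: for num > 0 the halve/decrement process takes
--     # bit_length(num) + popcount(num) - 1 steps
--     if num == 0:
--         return count
--     return count + num.bit_length() + bin(num).count("1") - 1
-- ===== Notes on version B (the rewrite author's own statement) =====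
-- stated objective: faster
-- what changed: Replaces the tail recursion that simulates every halving/decrement step by the closed form bit_length(num) + popcount(num) - 1 for num > 0.
import Mathlib
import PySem

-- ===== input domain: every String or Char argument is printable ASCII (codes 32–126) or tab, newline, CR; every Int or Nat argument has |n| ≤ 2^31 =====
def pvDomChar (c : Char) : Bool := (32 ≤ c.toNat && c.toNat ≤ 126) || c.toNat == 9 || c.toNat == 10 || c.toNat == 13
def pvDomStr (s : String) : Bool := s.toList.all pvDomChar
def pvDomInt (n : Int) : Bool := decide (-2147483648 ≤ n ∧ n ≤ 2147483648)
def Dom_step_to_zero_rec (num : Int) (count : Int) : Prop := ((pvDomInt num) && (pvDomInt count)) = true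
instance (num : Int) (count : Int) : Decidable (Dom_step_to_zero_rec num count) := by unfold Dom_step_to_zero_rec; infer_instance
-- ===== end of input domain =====

-- B replaces the step-by-step tail recursion by the closed form
-- bit_length(num) + popcount(num) - 1 (for num > 0); objective: faster.

-- ===== PORT A =====
-- literal transliteration of A's tail recursion; the Nat fuel only makes the
-- recursion total (num.toNat + 1 strictly exceeds the number of recursive calls
-- whenever 0 ≤ num, i.e. on every input admitted by Pre_)
def stepToZeroFuel (fuel : Nat) (num : Int) (count : Int) : Int :=
  match fuel with
  | 0 => count
  | fuel + 1 =>
    if num = 0 then count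
    else if PySem.Int.mod num 2 = 0 then
      stepToZeroFuel fuel (PySem.Int.floordiv num 2) (count + 1)
    else
      stepToZeroFuel fuel (num - 1) (count + 1)

def step_to_zero_rec (num : Int) (count : Int) : Int :=
  stepToZeroFuel (num.toNat + 1) num count

-- ===== PORT B =====
def step_to_zero_rec_alt (num : Int) (count : Int) : Int :=
  if num = 0 then count
  else count + (PySem.Int.bitLength num : Int) + (PySem.Int.bitCount num : Int) - 1

-- ===== PRECONDITION & SPEC =====
-- A recurses forever (Python: RecursionError) on negative num; Pre_ keeps the
-- natural domain of the step-counting task, the non-negative integers.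
def Pre_step_to_zero_rec (num : Int) (count : Int) : Prop := 0 ≤ num
instance (num : Int) (count : Int) : Decidable (Pre_step_to_zero_rec num count) := by unfold Pre_step_to_zero_rec; infer_instance
def pvWitness_step_to_zero_rec : Int × Int := (6, 0)

def Spec_step_to_zero_rec (num : Int) (count : Int) (out : Int) : Prop := out = step_to_zero_rec_alt num count
instance (num : Int) (count : Int) (out : Int) : Decidable (Spec_step_to_zero_rec num count out) := by unfold Spec_step_to_zero_rec; infer_instance

-- ===== CLAIM (what is proved, stated in full; the proofs are below) =====
def Claim_equal_step_to_zero_rec : Prop := ∀ (num : Int) (count : Int), Dom_step_to_zero_rec num count → Pre_step_to_zero_rec num count → Spec_step_to_zero_rec num count (step_to_zero_rec num count)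

-- ===== LEMMAS AND PROOFS =====

theorem stepToZeroFuel_natCast (fuel : Nat) :
    ∀ (n : Nat) (count : Int), n ≤ fuel →
      stepToZeroFuel fuel (n : Int) count = step_to_zero_rec_alt (n : Int) count := by
  induction fuel with
  | zero =>
    intro n count hle
    interval_cases n
    simp [stepToZeroFuel, step_to_zero_rec_alt]
  | succ f ih =>
    intro n count hle
    rcases Nat.eq_zero_or_pos n with h0 | hpos
    · subst h0; simp [stepToZeroFuel, step_to_zero_rec_alt]
    · have hne : ((n : Int)) ≠ 0 := by exact_mod_cast Nat.pos_iff_ne_zero.mp hpos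
      have hmod : PySem.Int.mod (n : Int) 2 = ((n % 2 : Nat) : Int) := by
        exact_mod_cast PySem.Int.mod_natCast n 2
      have hdiv : PySem.Int.floordiv (n : Int) 2 = ((n / 2 : Nat) : Int) := by
        exact_mod_cast PySem.Int.floordiv_natCast n 2
      have hbl := PySem.Int.bitLength_natCast hpos
      have hbc := PySem.Int.bitCount_natCast hpos
      by_cases hev : n % 2 = 0
      · -- even branch
        have hn2 : 1 ≤ n / 2 := by omega
        have hrec := ih (n / 2) (count + 1) (by omega)
        simp only [stepToZeroFuel, hne, if_neg hne, hmod, hdiv, hev] at *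
        simp only [Nat.cast_zero, if_pos rfl, hrec]
        have hne2 : ((n / 2 : Nat) : Int) ≠ 0 := by exact_mod_cast Nat.pos_iff_ne_zero.mp hn2
        simp only [step_to_zero_rec_alt, if_neg hne, if_neg hne2, hbl, hbc]
        push_cast
        ring
      · -- odd branch
        have hodd : n % 2 = 1 := by omega
        have hsub : (n : Int) - 1 = ((n - 1 : Nat) : Int) := by push_cast [hpos]; ring
        have hrec := ih (n - 1) (count + 1) (by omega)
        simp only [stepToZeroFuel, if_neg hne, hmod, hodd]
        norm_num
        rw [hsub, hrec]
        rcases Nat.lt_or_ge n 2 with h1 | h2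
        · -- n = 1
          have : n = 1 := by omega
          subst this
          have e1 : PySem.Int.bitLength (1 : Int) = 1 := by decide
          have e2 : PySem.Int.bitCount (1 : Int) = 1 := by decide
          norm_num [step_to_zero_rec_alt, e1, e2]
        · -- n ≥ 3 (odd), so n - 1 is even and positive
          have hm1pos : 1 ≤ n - 1 := by omega
          have hnem1 : ((n - 1 : Nat) : Int) ≠ 0 := by exact_mod_cast Nat.pos_iff_ne_zero.mp hm1pos
          have hblm := PySem.Int.bitLength_natCast hm1pos
          have hbcm := PySem.Int.bitCount_natCast hm1pos
          have hhalf : (n - 1) / 2 = n / 2 := by omega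
          have hmod2 : (n - 1) % 2 = 0 := by omega
          rw [hhalf] at hblm
          rw [hhalf, hmod2] at hbcm
          simp only [step_to_zero_rec_alt, if_neg hne, if_neg hnem1, hbl, hbc, hblm, hbcm,
            hodd]
          push_cast
          ring

-- ===== VERDICT (by name: the statement is the Claim_ definition above) =====
theorem step_to_zero_rec_spec : Claim_equal_step_to_zero_rec := by
  intro num count _ hpre
  unfold Spec_step_to_zero_rec step_to_zero_rec
  have hnum : ((num.toNat : Nat) : Int) = num := Int.toNat_of_nonneg hpre
  rw [← hnum]
  exact stepToZeroFuel_natCast (num.toNat + 1) num.toNat count (by omega)
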